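-- pv_equiv track=rewrite | github.com/SuyashBirar/dsl | pr1_cricket.py | neither_cricket_nor_badminton
-- ===== SOURCE A (Python) =====
-- def remove_duplicates(lst):
--     """Remove duplicate entries from a list."""
--     unique = []
--     for item in lst:
--         if item not in unique:
--             unique.append(item)
--     return unique
--
-- def neither_cricket_nor_badminton(cricket, badminton, football):
--     """Find the number of students who play neither cricket nor badminton."""
--     all_students = remove_duplicates(cricket + badminton + football)
--     cricket_or_badminton = remove_duplicates(cricket + badminton)
--     result = []
--     for student in all_students:
--         if student not in cricket_or_badminton:
--             result.append(student)
--     return len(result)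
-- ===== SOURCE B (Python) =====
-- def neither_cricket_nor_badminton(cricket, badminton, football):
--     """Find the number of students who play neither cricket nor badminton."""
--     cb = set(cricket) | set(badminton)
--     return len(cb | set(football)) - len(cb)
-- ===== Notes on version B (the rewrite author's own statement) =====
-- stated objective: faster
-- what changed: B drops A's quadratic list-dedup helpers and the per-student membership-filter loop entirely: it builds the hash-set unions cricket|badminton and that union with football and returns the difference of their cardinalities (the cricket-or-badminton set is a subset of all students).
import Mathlib
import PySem

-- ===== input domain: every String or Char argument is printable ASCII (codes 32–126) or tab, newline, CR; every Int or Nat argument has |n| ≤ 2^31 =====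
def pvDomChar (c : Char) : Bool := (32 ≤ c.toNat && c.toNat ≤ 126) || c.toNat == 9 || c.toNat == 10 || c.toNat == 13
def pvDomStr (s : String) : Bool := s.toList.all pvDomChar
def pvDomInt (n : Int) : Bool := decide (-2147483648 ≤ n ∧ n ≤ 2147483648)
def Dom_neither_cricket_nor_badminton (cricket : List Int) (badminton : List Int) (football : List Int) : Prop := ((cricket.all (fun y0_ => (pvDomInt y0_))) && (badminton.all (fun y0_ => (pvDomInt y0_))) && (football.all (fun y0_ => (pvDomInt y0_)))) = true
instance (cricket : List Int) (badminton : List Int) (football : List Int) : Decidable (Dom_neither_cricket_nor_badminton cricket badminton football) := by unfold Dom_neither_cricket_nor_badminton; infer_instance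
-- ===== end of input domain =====

-- B replaces A's quadratic list-dedup helper and membership-filter loop with set-union
-- cardinality subtraction: |set(c)∪set(b)∪set(f)| - |set(c)∪set(b)|.

-- ===== PORT A =====
-- helper: remove_duplicates, the O(n^2) dedup loop of A
def removeDuplicates (lst : List Int) : List Int :=
  lst.foldl (fun unique item => if item ∈ unique then unique else unique ++ [item]) []

def neither_cricket_nor_badminton (cricket : List Int) (badminton : List Int) (football : List Int) : Int :=
  let all_students := removeDuplicates (cricket ++ badminton ++ football)
  let cricket_or_badminton := removeDuplicates (cricket ++ badminton)
  let result := all_students.foldl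
    (fun res student => if student ∈ cricket_or_badminton then res else res ++ [student]) []
  (result.length : Int)

-- ===== PORT B =====
def neither_cricket_nor_badminton_alt (cricket : List Int) (badminton : List Int) (football : List Int) : Int :=
  let cb := PySem.Set.union (PySem.Set.ofList cricket) (PySem.Set.ofList badminton)
  PySem.Set.len (PySem.Set.union cb (PySem.Set.ofList football)) - PySem.Set.len cb

-- ===== PRECONDITION & SPEC =====
def Spec_neither_cricket_nor_badminton (cricket : List Int) (badminton : List Int) (football : List Int) (out : Int) : Prop := out = neither_cricket_nor_badminton_alt cricket badminton football
instance (cricket : List Int) (badminton : List Int) (football : List Int) (out : Int) : Decidable (Spec_neither_cricket_nor_badminton cricket badminton football out) := by unfold Spec_neither_cricket_nor_badminton; infer_instance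

-- ===== CLAIM (what is proved, stated in full; the proofs are below) =====
def Claim_equal_neither_cricket_nor_badminton : Prop := ∀ (cricket : List Int) (badminton : List Int) (football : List Int), Dom_neither_cricket_nor_badminton cricket badminton football → Spec_neither_cricket_nor_badminton cricket badminton football (neither_cricket_nor_badminton cricket badminton football)

-- ===== LEMMAS AND PROOFS =====

-- A's dedup helper is exactly set(xs) in first-occurrence order
theorem removeDuplicates_eq_ofList (l : List Int) :
    removeDuplicates l = PySem.Set.ofList l := by
  have h : (fun (u : List Int) (i : Int) => if i ∈ u then u else u ++ [i]) = PySem.Set.add := by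
    funext u i
    rw [PySem.Set.add_eq_ite]
  simp [removeDuplicates, PySem.Set.ofList_eq_foldl, h]

-- updating with set(b) is the same as updating with b
theorem update_ofList_eq (s : PySem.Set Int) (b : List Int) :
    s.update (PySem.Set.ofList b) = s.update b := by
  rw [PySem.Set.update_eq_append_filter, PySem.Set.update_eq_append_filter,
      PySem.Set.ofList_ofList]

-- A's filter loop appends, to acc, the elements of l not in cb
theorem foldl_skip (cb acc l : List Int) :
    l.foldl (fun res s => if s ∈ cb then res else res ++ [s]) acc
      = acc ++ l.filter (fun s => decide (s ∉ cb)) := by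
  induction l generalizing acc with
  | nil => simp
  | cons x xs ih =>
      by_cases h : x ∈ cb <;> simp [h, ih, List.append_assoc]

theorem not_contains_eq (cb : PySem.Set Int) :
    (fun y => !PySem.Set.contains cb y) = (fun y => decide (y ∉ cb)) := by
  funext y
  by_cases h : y ∈ cb <;> simp [h]

-- ===== VERDICT (by name: the statement is the Claim_ definition above) =====
theorem neither_cricket_nor_badminton_spec : Claim_equal_neither_cricket_nor_badminton := by
  intro cricket badminton football _
  unfold Spec_neither_cricket_nor_badminton
  unfold neither_cricket_nor_badminton neither_cricket_nor_badminton_alt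
  simp only [removeDuplicates_eq_ofList, foldl_skip, PySem.Set.union]
  rw [update_ofList_eq, update_ofList_eq, ← PySem.Set.ofList_append cricket badminton,
      ← PySem.Set.ofList_append (cricket ++ badminton) football]
  rw [PySem.Set.ofList_append (cricket ++ badminton) football,
      PySem.Set.update_eq_append_filter, not_contains_eq]
  set cb := PySem.Set.ofList (cricket ++ badminton) with hcb
  rw [List.filter_append, List.filter_filter]
  have h1 : cb.filter (fun s => decide (s ∉ cb)) = [] := by
    rw [List.filter_eq_nil_iff]; intro a ha; simp [ha]
  have h2 : (fun a => decide (a ∉ cb) && decide (a ∉ cb)) = (fun a => decide (a ∉ cb)) := by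
    funext a; exact Bool.and_self _
  rw [h1, h2]
  simp [PySem.Set.len]
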